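-- pv_equiv track=rewrite | github.com/Coelho90/data_science_nanodegree | string_breaker.py | string_breaker
-- ===== SOURCE A (Python) =====
-- def string_breaker(list):
-- 	"""
-- 	Returns a String with 140 characters
-- 	"""
-- 	news_ticker = ""
-- 	for item in list:
-- 		if len(news_ticker + item + " ") <= 140:
-- 			news_ticker += item + " "
-- 		else:
-- 			break
--
-- 	return news_ticker
-- ===== SOURCE B (Python) =====
-- from bisect import bisect_right
--
-- def string_breaker(list):
-- 	"""
-- 	Returns a String with 140 characters
-- 	"""
-- 	sums = [0]
-- 	for item in list:
-- 		sums.append(sums[-1] + len(item) + 1)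
-- 	k = bisect_right(sums, 140) - 1
-- 	return "".join(piece + " " for piece in list[:k])
-- ===== Notes on version B (the rewrite author's own statement) =====
-- stated objective: alternative
-- what changed: Instead of greedily concatenating strings and breaking, B first builds the integer prefix sums of piece lengths, binary-searches (bisect_right) for the largest prefix whose total length fits in 140, then joins exactly that prefix in one go.
import Mathlib
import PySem

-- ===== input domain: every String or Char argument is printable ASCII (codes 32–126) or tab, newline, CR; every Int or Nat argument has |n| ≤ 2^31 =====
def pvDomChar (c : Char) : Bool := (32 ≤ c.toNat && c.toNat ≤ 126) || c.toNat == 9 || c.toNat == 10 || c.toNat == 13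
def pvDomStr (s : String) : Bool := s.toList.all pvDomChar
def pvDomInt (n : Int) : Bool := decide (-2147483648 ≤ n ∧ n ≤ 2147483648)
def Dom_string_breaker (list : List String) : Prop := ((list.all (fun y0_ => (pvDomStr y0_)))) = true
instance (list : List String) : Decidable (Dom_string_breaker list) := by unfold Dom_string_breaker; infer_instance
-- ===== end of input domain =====

-- B replaces A's greedy concatenate-and-break loop with integer prefix sums of the
-- piece lengths, a bisect_right binary search for the largest fitting prefix, and
-- a single join of that prefix (alternative decomposition, same asymptotic cost).

-- ===== PORT A =====
def stringBreakerLoop (news_ticker : String) : List String → String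
  | [] => news_ticker
  | item :: rest =>
    if PySem.Str.len (news_ticker ++ item ++ " ") ≤ 140 then
      stringBreakerLoop (news_ticker ++ item ++ " ") rest
    else news_ticker

def string_breaker (list : List String) : String := stringBreakerLoop "" list

-- ===== PORT B =====
-- the `for item in list: sums.append(sums[-1] + len(item) + 1)` loop
def bSums (sums : List Int) : List String → List Int
  | [] => sums
  | item :: rest => bSums (sums ++ [sums.getLastD 0 + PySem.Str.len item + 1]) rest

def string_breaker_alt (list : List String) : String :=
  let sums := bSums [0] list
  -- bisect_right(sums, 140) - 1; on these inputs sums[0] = 0 ≤ 140, so the result is ≥ 1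
  let k : Nat := PySem.List.bisectRight sums 140 - 1
  PySem.Str.join "" ((list.take k).map (fun piece => piece ++ " "))

-- ===== PRECONDITION & SPEC =====
def Spec_string_breaker (list : List String) (out : String) : Prop := out = string_breaker_alt list
instance (list : List String) (out : String) : Decidable (Spec_string_breaker list out) := by unfold Spec_string_breaker; infer_instance

-- ===== CLAIM (what is proved, stated in full; the proofs are below) =====
def Claim_equal_string_breaker : Prop := ∀ (list : List String), Dom_string_breaker list → Spec_string_breaker list (string_breaker list)

-- ===== LEMMAS AND PROOFS =====

-- greedy count of items A's loop consumes, starting from ticker length c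
def gCnt (c : Int) : List String → Nat
  | [] => 0
  | x :: xs => if c + PySem.Str.len x + 1 ≤ 140 then gCnt (c + PySem.Str.len x + 1) xs + 1 else 0

-- prefix sums starting at c
def scanlL (c : Int) : List String → List Int
  | [] => [c]
  | x :: xs => c :: scanlL (c + PySem.Str.len x + 1) xs

def foldPieces (t : String) : List String → String
  | [] => t
  | x :: xs => foldPieces (t ++ x ++ " ") xs

lemma loop_eq_fold (xs : List String) : ∀ t : String,
    stringBreakerLoop t xs = foldPieces t (xs.take (gCnt (PySem.Str.len t) xs)) := by
  induction xs with
  | nil => intro t; simp [stringBreakerLoop, gCnt, foldPieces]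
  | cons x xs ih =>
    intro t
    have hlen : PySem.Str.len (t ++ x ++ " ") = PySem.Str.len t + PySem.Str.len x + 1 := by
      rw [PySem.Str.len_append, PySem.Str.len_append]
      have h1 : PySem.Str.len " " = 1 := by decide
      omega
    by_cases h : PySem.Str.len t + PySem.Str.len x + 1 ≤ 140
    · simp only [stringBreakerLoop, gCnt, hlen, if_pos h, List.take_succ_cons, foldPieces]
      rw [ih (t ++ x ++ " "), hlen]
    · simp only [stringBreakerLoop, gCnt, hlen, if_neg h, List.take_zero, foldPieces]

lemma bSums_eq_scanl (xs : List String) : ∀ (p : List Int) (c : Int),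
    bSums (p ++ [c]) xs = p ++ scanlL c xs := by
  induction xs with
  | nil => intro p c; simp [bSums, scanlL]
  | cons x xs ih =>
    intro p c
    have : (p ++ [c]).getLastD 0 = c := by simp
    simp only [bSums, this, List.append_assoc]
    rw [show [c] ++ [c + PySem.Str.len x + 1] = [c] ++ [c + PySem.Str.len x + 1] from rfl,
      ← List.append_assoc, ih (p ++ [c]) (c + PySem.Str.len x + 1)]
    simp [scanlL]

lemma len_nonneg (x : String) : 0 ≤ PySem.Str.len x := by
  rw [PySem.Str.len_eq]; positivity

lemma scanl_lb (xs : List String) : ∀ c, ∀ y ∈ scanlL c xs, c ≤ y := by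
  induction xs with
  | nil => intro c y hy; simp [scanlL] at hy; omega
  | cons x xs ih =>
    intro c y hy
    simp only [scanlL, List.mem_cons] at hy
    rcases hy with h | h
    · omega
    · have := ih (c + PySem.Str.len x + 1) y h
      have := len_nonneg x
      omega

lemma scanl_sorted (xs : List String) : ∀ c, (scanlL c xs).Pairwise (fun a b => a ≤ b) := by
  induction xs with
  | nil => intro c; simp [scanlL]
  | cons x xs ih =>
    intro c
    simp only [scanlL, List.pairwise_cons]
    refine ⟨fun y hy => ?_, ih _⟩
    have := scanl_lb xs (c + PySem.Str.len x + 1) y hy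
    have := len_nonneg x
    omega

-- the greedy count + 1 satisfies bisect_right's defining bounds on the prefix sums
lemma gCnt_bounds (xs : List String) : ∀ c, c ≤ 140 →
    gCnt c xs + 1 ≤ (scanlL c xs).length ∧
    (∀ (j : Nat) (hj : j < (scanlL c xs).length), j < gCnt c xs + 1 → (scanlL c xs)[j] ≤ 140) ∧
    (∀ (j : Nat) (hj : j < (scanlL c xs).length), gCnt c xs + 1 ≤ j → 140 < (scanlL c xs)[j]) := by
  induction xs with
  | nil =>
    intro c hc
    refine ⟨by simp [gCnt, scanlL], ?_, ?_⟩
    · intro j hj _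
      simp [scanlL] at hj ⊢
      subst hj; simpa [gCnt, scanlL]
    · intro j hj h
      simp [gCnt, scanlL] at hj h; omega
  | cons x xs ih =>
    intro c hc
    by_cases h : c + PySem.Str.len x + 1 ≤ 140
    · obtain ⟨h1, h2, h3⟩ := ih (c + PySem.Str.len x + 1) h
      refine ⟨?_, ?_, ?_⟩
      · simp only [gCnt, if_pos h, scanlL, List.length_cons]; omega
      · intro j hj hjm
        simp only [gCnt, if_pos h] at hjm
        match j with
        | 0 => simpa [scanlL]
        | j + 1 =>
          simp only [scanlL, List.getElem_cons_succ]
          simp only [scanlL, List.length_cons] at hj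
          exact h2 j (by omega) (by omega)
      · intro j hj hjm
        simp only [gCnt, if_pos h] at hjm
        match j with
        | 0 => omega
        | j + 1 =>
          simp only [scanlL, List.getElem_cons_succ]
          simp only [scanlL, List.length_cons] at hj
          exact h3 j (by omega) (by omega)
    · refine ⟨?_, ?_, ?_⟩
      · simp only [gCnt, if_neg h, scanlL, List.length_cons]; omega
      · intro j hj hjm
        simp only [gCnt, if_neg h] at hjm
        match j with
        | 0 => simpa [scanlL]
        | j + 1 => omega
      · intro j hj hjm
        match j with
        | 0 => simp only [gCnt, if_neg h] at hjm; omega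
        | j + 1 =>
          simp only [scanlL, List.getElem_cons_succ]
          simp only [scanlL, List.length_cons] at hj
          have hmem : (scanlL (c + PySem.Str.len x + 1) xs)[j] ∈ scanlL (c + PySem.Str.len x + 1) xs :=
            List.getElem_mem _
          have := scanl_lb xs (c + PySem.Str.len x + 1) _ hmem
          omega

-- two indices satisfying bisect_right's bounds coincide
lemma bounds_uniq (a : List Int) (x : Int) (m n : Nat)
    (hm1 : m ≤ a.length) (hm2 : ∀ (j : Nat) (hj : j < a.length), j < m → a[j] ≤ x)
    (hm3 : ∀ (j : Nat) (hj : j < a.length), m ≤ j → x < a[j])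
    (hn1 : n ≤ a.length) (hn2 : ∀ (j : Nat) (hj : j < a.length), j < n → a[j] ≤ x)
    (hn3 : ∀ (j : Nat) (hj : j < a.length), n ≤ j → x < a[j]) : m = n := by
  by_contra hne
  rcases Nat.lt_or_ge m n with h | h
  · have h1 := hn2 m (by omega) h
    have h2 := hm3 m (by omega) (le_refl m)
    omega
  · have h' : n < m := by omega
    have h1 := hm2 n (by omega) h'
    have h2 := hn3 n (by omega) (le_refl n)
    omega

lemma bisect_eq_gCnt (xs : List String) (c : Int) (hc : c ≤ 140) :
    PySem.List.bisectRight (scanlL c xs) 140 = gCnt c xs + 1 := by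
  obtain ⟨b1, b2, b3⟩ := PySem.List.bisectRight_spec (scanlL c xs) 140 (scanl_sorted xs c)
  obtain ⟨g1, g2, g3⟩ := gCnt_bounds xs c hc
  exact bounds_uniq (scanlL c xs) 140 _ _ b1 b2 b3 g1 g2 g3

-- "".join of the pieces is A's fold
lemma join_empty_cons (x : String) (l : List String) :
    PySem.Str.join "" (x :: l) = x ++ PySem.Str.join "" l := by
  apply String.toList_inj.mp
  rw [PySem.Str.toList_join, String.toList_append, PySem.Str.toList_join]
  cases l with
  | nil => simp [PySem.Chars.join_nil, PySem.Chars.join_singleton]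
  | cons y ys =>
    rw [List.map_cons, List.map_cons, PySem.Chars.join_cons_cons]
    simp

lemma fold_eq_join (l : List String) : ∀ t : String,
    foldPieces t l = t ++ PySem.Str.join "" (l.map (fun piece => piece ++ " ")) := by
  induction l with
  | nil =>
    intro t
    apply String.toList_inj.mp
    simp [foldPieces, PySem.Str.toList_join, PySem.Chars.join_nil]
  | cons x xs ih =>
    intro t
    rw [List.map_cons, join_empty_cons,
      show foldPieces t (x :: xs) = foldPieces (t ++ x ++ " ") xs from rfl, ih]
    apply String.toList_inj.mp
    simp

-- ===== VERDICT (by name: the statement is the Claim_ definition above) =====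
theorem string_breaker_spec : Claim_equal_string_breaker := by
  intro list _
  unfold Spec_string_breaker string_breaker string_breaker_alt
  rw [loop_eq_fold]
  have h0 : bSums [0] list = scanlL 0 list := by
    have := bSums_eq_scanl list [] 0
    simpa using this
  simp only [h0, bisect_eq_gCnt list 0 (by norm_num), Nat.add_sub_cancel]
  have hlen0 : PySem.Str.len "" = 0 := by decide
  rw [hlen0, fold_eq_join]
  simp
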